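-- pv_equiv track=rewrite | github.com/GuillermoBlancoNunez/Pract1_ALF | mg~.py | mg
-- ===== SOURCE A (Python) =====
-- from typing import List
--
-- def producir(cad: str) -> str:
--     """
--     Modifica una cadena reemplazando cada ocurrencia de 'g' con '~g~'.
--
--     Args:
--     cad (str): La cadena de entrada que será procesada.
--
--     Returns:
--     str: La cadena modificada con cada 'g' rodeado por '~'.
--     """
--     for i in cad:
--         if i == "g":
--             cad = cad[:cad.index(i)] + "~" + cad[cad.index(i):] + "~"
--     return cad
--
-- def axioma(i: int) -> str:
--     """
--     Genera una cadena inicial basada en un número dado.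
--
--     Args:
--     i (int): Número de '~' a agregar en ambos extremos de la cadena base "m~g".
--
--     Returns:
--     str: La cadena generada.
--     """
--     return (i * "~") + "m~g" + (i * "~") + "~"
--
-- def mg(n: int) -> List[str]:
--     """
--     Genera una colección de teoremas aplicando reglas de producción.
--
--     Args:
--     n (int): Número de teoremas a generar.
--
--     Returns:
--     List[str]: Una lista con las cadenas generadas según las reglas de producción.
--     """
--     coleccion = []
--     orden = []
--     i = 0
--
--     while len(coleccion) < n:
--         s = axioma(i)  # Genera la cadena inicial
--         coleccion.append(s)  # Agrega el axioma a la colección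
--         orden.append(s)  # Se añade a la lista de procesamiento
--
--         # Aplica la regla de producción y almacena el resultado
--         c = producir(orden.pop(0))
--         coleccion.append(c)
--         orden.append(c)
--
--         i += 1  # Incrementa el índice para el siguiente axioma
--
--     return coleccion
-- ===== SOURCE B (Python) =====
-- from typing import List
--
-- def producir(cad: str) -> str:
--     for i in cad:
--         if i == "g":
--             cad = cad[:cad.index(i)] + "~" + cad[cad.index(i):] + "~"
--     return cad
--
-- def axioma(i: int) -> str:
--     return (i * "~") + "m~g" + (i * "~") + "~"
--
-- def mg(n: int) -> List[str]:
--     """Build the collection directly from the closed recurrence instead of a FIFO queue: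
--     element 2i is axioma(i), element 2i+1 is producir(coleccion[i])."""
--     cnt = 2 * ((n + 1) // 2) if n > 0 else 0
--     coleccion = []
--     for p in range(cnt):
--         if p % 2 == 0:
--             coleccion.append(axioma(p // 2))
--         else:
--             coleccion.append(producir(coleccion[(p - 1) // 2]))
--     return coleccion
-- ===== Notes on version B (the rewrite author's own statement) =====
-- stated objective: simpler
-- what changed: Eliminates the FIFO 'orden' queue: the element count 2*((n+1)//2) is computed up front and the list is built directly from the closed recurrence (element 2i = axioma(i), element 2i+1 = producir(coleccion[i])) by indexing into the list being built.
import Mathlib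
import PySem

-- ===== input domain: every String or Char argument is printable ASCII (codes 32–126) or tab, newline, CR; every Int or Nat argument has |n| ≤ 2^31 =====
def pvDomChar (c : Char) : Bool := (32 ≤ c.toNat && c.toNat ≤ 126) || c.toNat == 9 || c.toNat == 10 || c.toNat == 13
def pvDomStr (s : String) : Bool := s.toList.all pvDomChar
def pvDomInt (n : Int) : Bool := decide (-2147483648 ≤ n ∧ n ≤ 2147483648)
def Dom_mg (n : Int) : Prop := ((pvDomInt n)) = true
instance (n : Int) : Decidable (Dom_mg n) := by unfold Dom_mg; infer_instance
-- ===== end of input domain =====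

-- B replaces A's FIFO-queue interleaving with a direct build from the closed recurrence
-- (element 2i = axioma i, element 2i+1 = producir of element i); objective: simpler.

-- ===== PORT A =====
-- shared module helpers (byte-identical in Source A and Source B)
-- producir: Python iterates over the ORIGINAL string while reassigning cad; cad.index("g")
-- is ported as PySem.Chars.find (the guard c = 'g' keeps 'g' present in cad, so find = index).
def producir (cad : String) : String :=
  String.mk (cad.toList.foldl (fun acc c =>
    if c = 'g' then
      let idx := PySem.Chars.find acc ['g']
      PySem.List.slice acc none (some idx) ++ ['~'] ++ PySem.List.slice acc (some idx) none ++ ['~']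
    else acc) cad.toList)

def axioma (i : Int) : String :=
  String.mk (PySem.List.pyRepeat ['~'] i ++ "m~g".toList ++ PySem.List.pyRepeat ['~'] i ++ ['~'])

-- the while-loop of A; orden.pop(0) is ported via PySem.List.pop? (the empty case is
-- unreachable: an element was just appended; it is a totality guard only)
def mgLoop (n : Int) (col orden : List String) (i : Int) : List String :=
  if h : (col.length : Int) < n then
    match PySem.List.pop? (orden ++ [axioma i]) 0 with
    | none => col ++ [axioma i]
    | some (hd, rest) =>
      mgLoop n ((col ++ [axioma i]) ++ [producir hd]) (rest ++ [producir hd]) (i + 1)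
  else col
termination_by (n - col.length).toNat
decreasing_by simp; omega

def mg (n : Int) : List String := mgLoop n [] [] 0

-- ===== PORT B =====
-- coleccion[(p-1)//2] always exists ((p-1)//2 < p); the none branch is a totality guard
def mg_alt (n : Int) : List String :=
  let cnt : Int := if n > 0 then 2 * PySem.Int.floordiv (n + 1) 2 else 0
  (PySem.List.pyRange 0 cnt).foldl (fun acc p =>
    if PySem.Int.mod p 2 = 0 then
      acc ++ [axioma (PySem.Int.floordiv p 2)]
    else
      match PySem.List.pyGet? acc (PySem.Int.floordiv (p - 1) 2) with
      | some s => acc ++ [producir s]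
      | none => acc) []

-- ===== PRECONDITION & SPEC =====
def Spec_mg (n : Int) (out : List String) : Prop := out = mg_alt n
instance (n : Int) (out : List String) : Decidable (Spec_mg n out) := by unfold Spec_mg; infer_instance

-- ===== CLAIM (what is proved, stated in full; the proofs are below) =====
def Claim_equal_mg : Prop := ∀ (n : Int), Dom_mg n → Spec_mg n (mg n)

-- ===== LEMMAS AND PROOFS =====

-- one pair of appends: what both loops do in one round, starting from a collection col
def stepPair (col : List String) (i : Int) : List String :=
  let col1 := col ++ [axioma i]
  col1 ++ [producir (PySem.List.pyGetD col1 i "")]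

def stepN (col : List String) (i : Int) : Nat → List String
  | 0 => col
  | m + 1 => stepN (stepPair col i) (i + 1) m

-- A's loop without the queue
def buildFrom (n : Int) (col : List String) (i : Int) : List String :=
  if (col.length : Int) < n then buildFrom n (stepPair col i) (i + 1) else col
termination_by (n - col.length).toNat
decreasing_by simp [stepPair]; omega

lemma stepPair_length (col : List String) (i : Int) :
    (stepPair col i).length = col.length + 2 := by simp [stepPair]

lemma mgLoop_eq_buildFrom (fuel : Nat) : ∀ (n i : Int) (col : List String),
    (n - col.length).toNat ≤ fuel → 0 ≤ i → i.toNat ≤ col.length →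
    mgLoop n col (col.drop i.toNat) i = buildFrom n col i := by
  induction fuel with
  | zero =>
    intro n i col hf _ _
    rw [mgLoop, buildFrom]
    have : ¬ ((col.length : Int) < n) := by omega
    simp [this]
  | succ f ih =>
    intro n i col hf hi hle
    obtain ⟨k, rfl⟩ : ∃ k : Nat, i = (k : Int) := ⟨i.toNat, by omega⟩
    simp only [Int.toNat_natCast] at hle ⊢
    rw [mgLoop, buildFrom]
    by_cases h : (col.length : Int) < n
    · rw [dif_pos h, if_pos h]
      have hlt : k < (col ++ [axioma (k : Int)]).length := by
        simp only [List.length_append, List.length_singleton]; omega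
      have hdrop : col.drop k ++ [axioma (k : Int)] = (col ++ [axioma (k : Int)]).drop k :=
        (List.drop_append_of_le_length hle).symm
      have hcons := List.drop_eq_getElem_cons hlt
      rw [hdrop, hcons]
      simp only [PySem.List.pop?_zero_cons]
      have hget : PySem.List.pyGetD (col ++ [axioma (k : Int)]) (k : Int) ""
          = (col ++ [axioma (k : Int)])[k] := by
        rw [PySem.List.pyGetD_of_nonneg _ _ (Int.natCast_nonneg k), Int.toNat_natCast,
          List.getD_eq_getElem _ _ hlt]
      have hstep : stepPair col (k : Int)
          = (col ++ [axioma (k : Int)]) ++ [producir (col ++ [axioma (k : Int)])[k]] := by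
        simp [stepPair, hget]
      have hdrop2 : (col ++ [axioma (k : Int)]).drop (k + 1)
            ++ [producir (col ++ [axioma (k : Int)])[k]]
          = (stepPair col (k : Int)).drop (k + 1) := by
        rw [hstep]
        exact (List.drop_append_of_le_length (by
          simp only [List.length_append, List.length_singleton]; omega)).symm
      have hIH := ih n ((k + 1 : Nat) : Int) (stepPair col (k : Int))
        (by rw [stepPair_length]; omega) (Int.natCast_nonneg _)
        (by rw [stepPair_length, Int.toNat_natCast]; omega)
      simp only [Int.toNat_natCast] at hIH
      have hcast : ((k + 1 : Nat) : Int) = (k : Int) + 1 := by push_cast; ring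
      rw [hcast] at hIH
      simpa only [hdrop2, ← hstep] using hIH
    · simp [h]

-- number of pair-rounds the loop performs when entering with col.length = 2*i
lemma buildFrom_eq_stepN (fuel : Nat) : ∀ (n i : Int) (col : List String),
    (n - col.length).toNat ≤ fuel → 0 ≤ i → (col.length : Int) = 2 * i →
    buildFrom n col i = stepN col i ((n + 1).toNat / 2 - i.toNat) := by
  induction fuel with
  | zero =>
    intro n i col hf hi hlen
    rw [buildFrom]
    have h : ¬ ((col.length : Int) < n) := by omega
    have hm : (n + 1).toNat / 2 - i.toNat = 0 := by omega
    simp [h, hm, stepN]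
  | succ f ih =>
    intro n i col hf hi hlen
    rw [buildFrom]
    by_cases h : (col.length : Int) < n
    · simp only [h, if_pos]
      have hm : (n + 1).toNat / 2 - i.toNat = ((n + 1).toNat / 2 - (i + 1).toNat) + 1 := by omega
      rw [hm, stepN]
      exact ih n (i + 1) (stepPair col i) (by rw [stepPair_length]; omega) (by omega)
        (by rw [stepPair_length]; push_cast; omega)
    · have hm : (n + 1).toNat / 2 - i.toNat = 0 := by omega
      simp [h, hm, stepN]

lemma fold_pairs : ∀ (m : Nat) (i : Int) (col : List String), 0 ≤ i → (col.length : Int) = 2 * i →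
    (PySem.List.pyRange (2 * i) (2 * i + 2 * m)).foldl (fun acc p =>
      if PySem.Int.mod p 2 = 0 then
        acc ++ [axioma (PySem.Int.floordiv p 2)]
      else
        match PySem.List.pyGet? acc (PySem.Int.floordiv (p - 1) 2) with
        | some s => acc ++ [producir s]
        | none => acc) col = stepN col i m := by
  intro m
  induction m with
  | zero =>
    intro i col _ _
    rw [PySem.List.pyRange_one_eq_nil (by omega)]
    simp [stepN]
  | succ m ih =>
    intro i col hi hlen
    obtain ⟨k, rfl⟩ : ∃ k : Nat, i = (k : Int) := ⟨i.toNat, by omega⟩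
    rw [PySem.List.pyRange_one_cons (by omega), PySem.List.pyRange_one_cons (by omega)]
    simp only [List.foldl_cons]
    have hmod0 : PySem.Int.mod (2 * (k : Int)) 2 = 0 := by
      rw [PySem.Int.mod_eq_zero_iff_dvd]; exact ⟨(k : Int), by ring⟩
    have hmod1 : ¬ (PySem.Int.mod (2 * (k : Int) + 1) 2 = 0) := by
      rw [PySem.Int.mod_eq_emod_of_pos (by omega)]; omega
    have hdiv0 : PySem.Int.floordiv (2 * (k : Int)) 2 = (k : Int) := by
      rw [PySem.Int.floordiv_eq_ediv_of_pos (by omega)]; omega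
    have hdiv1 : PySem.Int.floordiv (2 * (k : Int) + 1 - 1) 2 = (k : Int) := by
      rw [PySem.Int.floordiv_eq_ediv_of_pos (by omega)]; omega
    have hlt : k < (col ++ [axioma (k : Int)]).length := by
      simp only [List.length_append, List.length_singleton]; omega
    have hget : PySem.List.pyGet? (col ++ [axioma (k : Int)]) (k : Int)
        = some (col ++ [axioma (k : Int)])[k] := PySem.List.pyGet?_ofNat _ _ hlt
    rw [if_pos hmod0, hdiv0, if_neg hmod1, hdiv1]
    simp only [hget]
    have hgetD : PySem.List.pyGetD (col ++ [axioma (k : Int)]) (k : Int) ""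
        = (col ++ [axioma (k : Int)])[k] := by
      rw [PySem.List.pyGetD_of_nonneg _ _ (Int.natCast_nonneg k), Int.toNat_natCast,
        List.getD_eq_getElem _ _ hlt]
    have hstep : (col ++ [axioma (k : Int)]) ++ [producir (col ++ [axioma (k : Int)])[k]]
        = stepPair col (k : Int) := by
      simp [stepPair, hgetD]
    rw [hstep, stepN,
      show (2 * (k : Int) + 1 + 1) = 2 * ((k : Int) + 1) by ring,
      show (2 * (k : Int) + 2 * ((m + 1 : Nat) : Int)) = 2 * ((k : Int) + 1) + 2 * (m : Nat) by
        push_cast; ring]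
    exact ih ((k : Int) + 1) (stepPair col (k : Int)) (by omega)
      (by rw [stepPair_length]; push_cast; omega)

-- ===== VERDICT (by name: the statement is the Claim_ definition above) =====
theorem mg_spec : Claim_equal_mg := by
  unfold Claim_equal_mg
  intro n _
  unfold Spec_mg mg mg_alt
  have hA : mgLoop n [] [] 0 = stepN [] 0 ((n + 1).toNat / 2) := by
    have h1 := mgLoop_eq_buildFrom (n.toNat) n 0 [] (by simp) le_rfl (by simp)
    have h2 := buildFrom_eq_stepN (n.toNat) n 0 [] (by simp) le_rfl (by simp)
    simpa using h1.trans h2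
  rw [hA]
  by_cases hn : n > 0
  · simp only [if_pos hn]
    have hfd : PySem.Int.floordiv (n + 1) 2 = (((n + 1).toNat / 2 : Nat) : Int) := by
      rw [PySem.Int.floordiv_eq_ediv_of_pos (by omega)]; omega
    have := fold_pairs ((n + 1).toNat / 2) 0 [] le_rfl (by simp)
    simp only [mul_zero, zero_add] at this
    rw [hfd, ← this]
  · simp only [if_neg hn]
    rw [PySem.List.pyRange_one_eq_nil (by omega)]
    have : (n + 1).toNat / 2 = 0 := by omega
    simp [this, stepN]
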